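-- pv_equiv track=rewrite | github.com/675MadSpArtaN675/Hackaton_analyzis_salary_level | analyzis_module.py | _FindNeedQuartal
-- ===== SOURCE A (Python) =====
-- def _FindNeedQuartal(data: dict[int, list[str]], month: str):
--     last_not_empty = -1
--     for quartal_num in range(1, 5):
--         elements = data[quartal_num]
--
--         if elements != []:
--             last_not_empty = quartal_num
--
--         if month in elements:
--             return quartal_num
--
--     return last_not_empty
-- ===== SOURCE B (Python) =====
-- def _FindNeedQuartal(data: dict[int, list[str]], month: str):
--     # two-pass decomposition: forward search for the month, then reverse scan for the last nonempty quartal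
--     found = next((q for q in range(1, 5) if month in data[q]), None)
--     if found is not None:
--         return found
--     return next((q for q in range(4, 0, -1) if data[q] != []), -1)
-- ===== Notes on version B (the rewrite author's own statement) =====
-- stated objective: alternative
-- what changed: Replaces the single loop that interleaves the month search with a last-nonempty accumulator by two separate passes: a lazy forward search for the month, and only if that fails a reverse scan returning the first nonempty quartal.
import Mathlib
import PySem

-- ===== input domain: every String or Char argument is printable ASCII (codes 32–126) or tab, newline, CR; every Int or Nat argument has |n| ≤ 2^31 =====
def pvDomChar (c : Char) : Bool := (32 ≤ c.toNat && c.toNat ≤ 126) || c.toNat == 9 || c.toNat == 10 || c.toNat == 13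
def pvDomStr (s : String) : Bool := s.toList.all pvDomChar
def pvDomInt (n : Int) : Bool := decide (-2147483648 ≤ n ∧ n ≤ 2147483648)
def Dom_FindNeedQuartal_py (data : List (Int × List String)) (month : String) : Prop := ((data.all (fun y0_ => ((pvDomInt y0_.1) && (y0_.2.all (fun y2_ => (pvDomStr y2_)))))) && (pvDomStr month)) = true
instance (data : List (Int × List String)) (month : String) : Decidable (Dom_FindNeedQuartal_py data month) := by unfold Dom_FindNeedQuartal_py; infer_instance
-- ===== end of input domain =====

-- B replaces A's single interleaved loop by two separate passes (forward month search, then a reverse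
-- scan for the last nonempty quartal); objective: alternative decomposition, same cost.


-- ===== PORT A =====
-- A's single loop over quartals 1..4, carrying the last_not_empty accumulator.
-- data[q] on a missing key is a KeyError (excluded by Pre_); the none branch value is arbitrary.
def FNQloopA (data : List (Int × List String)) (month : String) : List Int → Int → Int
  | [], last => last
  | q :: qs, last =>
    match (PySem.Dict.mk data).get? q with
    | none => 0
    | some elements =>
      let last' := if elements ≠ [] then q else last
      if month ∈ elements then q else FNQloopA data month qs last'

def FindNeedQuartal_py (data : List (Int × List String)) (month : String) : Int :=
  FNQloopA data month [1, 2, 3, 4] (-1)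

-- ===== PORT B =====
-- B, pass 1: lazy forward search for the quartal containing the month (stops at the first hit;
-- a missing key before a hit is a KeyError in Python — excluded by Pre_, arbitrary value here).
def FNQfindB (data : List (Int × List String)) (month : String) : List Int → Option Int
  | [] => none
  | q :: qs =>
    match (PySem.Dict.mk data).get? q with
    | none => some 0
    | some elements => if month ∈ elements then some q else FNQfindB data month qs

-- B, pass 2: reverse scan, first nonempty quartal from the back.
def FNQlastB (data : List (Int × List String)) : List Int → Int
  | [] => -1
  | q :: qs =>
    match (PySem.Dict.mk data).get? q with
    | none => 0
    | some elements => if elements ≠ [] then q else FNQlastB data qs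

def FindNeedQuartal_py_alt (data : List (Int × List String)) (month : String) : Int :=
  match FNQfindB data month [1, 2, 3, 4] with
  | some q => q
  | none => FNQlastB data [4, 3, 2, 1]

-- ===== PRECONDITION & SPEC =====
-- Pre_ is exactly where A returns: every quartal key 1..4 is present, except that keys after the
-- first quartal containing the month are never read (A returns early); a missing key raises KeyError.
def Pre_FindNeedQuartal_py (data : List (Int × List String)) (month : String) : Prop :=
  ∀ q ∈ ([1, 2, 3, 4] : List Int),
    ((PySem.Dict.mk data).get? q).isSome = true ∨
    ∃ p ∈ ([1, 2, 3, 4] : List Int), p < q ∧ month ∈ ((PySem.Dict.mk data).getD p [])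
instance (data : List (Int × List String)) (month : String) : Decidable (Pre_FindNeedQuartal_py data month) := by unfold Pre_FindNeedQuartal_py; infer_instance

def pvWitness_FindNeedQuartal_py : (List (Int × List String)) × String :=
  ([(1, ["jan"]), (2, []), (3, ["mar"]), (4, [])], "mar")

def Spec_FindNeedQuartal_py (data : List (Int × List String)) (month : String) (out : Int) : Prop := out = FindNeedQuartal_py_alt data month
instance (data : List (Int × List String)) (month : String) (out : Int) : Decidable (Spec_FindNeedQuartal_py data month out) := by unfold Spec_FindNeedQuartal_py; infer_instance

-- ===== CLAIM (what is proved, stated in full; the proofs are below) =====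
def Claim_equal_FindNeedQuartal_py : Prop := ∀ (data : List (Int × List String)) (month : String), Dom_FindNeedQuartal_py data month → Pre_FindNeedQuartal_py data month → Spec_FindNeedQuartal_py data month (FindNeedQuartal_py data month)

-- ===== LEMMAS AND PROOFS =====

-- ===== VERDICT (by name: the statement is the Claim_ definition above) =====
theorem FindNeedQuartal_py_spec : Claim_equal_FindNeedQuartal_py := by
  intro data month _ hpre
  unfold Spec_FindNeedQuartal_py FindNeedQuartal_py FindNeedQuartal_py_alt
  have h1 := hpre 1 (by simp)
  have h2 := hpre 2 (by simp)
  have h3 := hpre 3 (by simp)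
  have h4 := hpre 4 (by simp)
  simp only [PySem.Dict.getD] at h1 h2 h3 h4
  cases e1 : (PySem.Dict.mk data).get? 1 with
  | none => simp [e1] at h1
  | some l1 =>
    by_cases m1 : month ∈ l1
    · simp [FNQloopA, FNQfindB, e1, m1]
    · cases e2 : (PySem.Dict.mk data).get? 2 with
      | none => simp [e1, e2, m1] at h2
      | some l2 =>
        by_cases m2 : month ∈ l2
        · simp [FNQloopA, FNQfindB, e1, e2, m1, m2]
        · cases e3 : (PySem.Dict.mk data).get? 3 with
          | none => simp [e1, e2, e3, m1, m2] at h3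
          | some l3 =>
            by_cases m3 : month ∈ l3
            · simp [FNQloopA, FNQfindB, e1, e2, e3, m1, m2, m3]
            · cases e4 : (PySem.Dict.mk data).get? 4 with
              | none => simp [e1, e2, e3, e4, m1, m2, m3] at h4
              | some l4 =>
                by_cases m4 : month ∈ l4
                · simp [FNQloopA, FNQfindB, e1, e2, e3, e4, m1, m2, m3, m4]
                · by_cases z4 : l4 = []
                  · by_cases z3 : l3 = []
                    · by_cases z2 : l2 = []
                      · by_cases z1 : l1 = [] <;>
                          simp [FNQloopA, FNQfindB, FNQlastB, e1, e2, e3, e4, m1, z1, z2, z3, z4]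
                      · simp [FNQloopA, FNQfindB, FNQlastB, e1, e2, e3, e4, m1, m2, z2, z3, z4]
                    · simp [FNQloopA, FNQfindB, FNQlastB, e1, e2, e3, e4, m1, m2, m3, z3, z4]
                  · simp [FNQloopA, FNQfindB, FNQlastB, e1, e2, e3, e4, m1, m2, m3, m4, z4]
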